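-- pv_equiv track=rewrite | github.com/giraffeiscute/FactorMarketRL | toy_ff_generator/src/toy_ff_generator/config.py | _default_stock_profiles
-- ===== SOURCE A (Python) =====
-- from itertools import product
--
-- MU_CLASS_LABELS = ("low", "mid", "high")
--
-- MU_AXES = ("characteristic_1", "characteristic_2", "characteristic_3")
--
-- PROFILE_GROUP_LABELS = ("mid", "low", "high")
--
-- def _default_mu_class_triplets(n: int) -> list[tuple[str, str, str]]:
--     """以固定順序循環建立 27 種 mu_i 三維類別組合。"""
--
--     # 針對三個 characteristic 維度，產生 low / mid / high 的所有笛卡兒積組合。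
--     all_triplets = list(product(MU_CLASS_LABELS, repeat=len(MU_AXES)))
--
--     # 若股票數量超過 27，則依固定順序循環重複使用這些 triplets。
--     return [all_triplets[idx % len(all_triplets)] for idx in range(n)]
--
-- def _default_stock_profiles(
--     n: int,
-- ) -> list[tuple[tuple[str, str, str], str, str]]:
--     """建立依固定排序排列的股票 profile 區塊，每個 profile 代表一組 mu / alpha / epsilon 類型。"""
--
--     # 先建立 27 種固定的 mu triplets。
--     mu_triplets = _default_mu_class_triplets(len(MU_CLASS_LABELS) ** len(MU_AXES))
--
--     # 建立完整 243 種 base profiles：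
--     # 27 種 mu triplets × 3 種 alpha_group × 3 種 epsilon_group。
--     all_profiles = [
--         (mu_triplet, alpha_group, epsilon_group)
--         for alpha_group in PROFILE_GROUP_LABELS
--         for epsilon_group in PROFILE_GROUP_LABELS
--         for mu_triplet in mu_triplets
--     ]
--
--     # profile 總數，理論上應為 243。
--     base_profile_count = len(all_profiles)
--
--     # 每個 profile 至少要分配幾檔股票。
--     base_block_size = n // base_profile_count
--
--     # 前 remainder 個 profile 會再多分配 1 檔股票。
--     remainder = n % base_profile_count
--
--     stock_profiles: list[tuple[tuple[str, str, str], str, str]] = []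
--
--     # 依固定排序把 profile 轉成連續的股票區塊。
--     for idx, profile in enumerate(all_profiles):
--         block_size = base_block_size + (1 if idx < remainder else 0)
--         stock_profiles.extend([profile] * block_size)
--
--     return stock_profiles
-- ===== SOURCE B (Python) =====
-- from itertools import product
--
-- MU_CLASS_LABELS = ("low", "mid", "high")
-- PROFILE_GROUP_LABELS = ("mid", "low", "high")
--
--
-- def _default_stock_profiles(n):
--     """Same 243-profile table, but each output position j computes its owning
--     profile index directly instead of extending one block per profile."""
--     triplets = list(product(MU_CLASS_LABELS, repeat=3))
--     all_profiles = [
--         (t, a, e)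
--         for a in PROFILE_GROUP_LABELS
--         for e in PROFILE_GROUP_LABELS
--         for t in triplets
--     ]
--     count = len(all_profiles)
--     base, remainder = divmod(n, count)
--     threshold = remainder * (base + 1)
--     out = []
--     for j in range(n):
--         if j < threshold:
--             p = j // (base + 1)
--         else:
--             p = remainder + (j - threshold) // base
--         out.append(all_profiles[p])
--     return out
-- ===== Notes on version B (the rewrite author's own statement) =====
-- stated objective: alternative
-- what changed: Instead of iterating over the profile table and extending one block per profile, B iterates over the n output positions and computes the owning profile index for each position in closed form (j//(base+1) below the remainder threshold, remainder+(j-threshold)//base above it).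
import Mathlib
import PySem

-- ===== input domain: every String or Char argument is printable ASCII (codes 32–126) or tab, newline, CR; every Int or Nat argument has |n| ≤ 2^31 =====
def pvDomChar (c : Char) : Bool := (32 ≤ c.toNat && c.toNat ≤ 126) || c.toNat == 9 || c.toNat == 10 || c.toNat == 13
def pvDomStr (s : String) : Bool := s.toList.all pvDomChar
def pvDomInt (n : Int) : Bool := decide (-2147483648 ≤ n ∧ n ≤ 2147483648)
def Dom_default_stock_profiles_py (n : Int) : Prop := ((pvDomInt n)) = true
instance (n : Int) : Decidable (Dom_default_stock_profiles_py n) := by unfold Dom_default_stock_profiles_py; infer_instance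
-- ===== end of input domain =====

-- B replaces A's block-extension loop over the profile table by a single pass over the n
-- output positions, computing each position's profile index in closed form (alternative
-- decomposition, same cost).

-- ===== PORT A =====
def pvMuLabels : List String := ["low", "mid", "high"]
def pvGroupLabels : List String := ["mid", "low", "high"]

-- itertools.product(MU_CLASS_LABELS, repeat=3): hand-ported as three nested loops in the
-- same (leftmost-slowest) order; exact on these literal tuples.
def pvAllTriplets : List (String × String × String) :=
  pvMuLabels.flatMap (fun a => pvMuLabels.flatMap (fun b => pvMuLabels.map (fun c => (a, b, c))))

-- all_triplets[idx % 27] never raises (0 ≤ idx % 27 < 27), so pyGetD is exact here.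
def default_mu_class_triplets_py (n : Int) : List (String × String × String) :=
  (PySem.List.pyRange 0 n 1).map (fun idx =>
    PySem.List.pyGetD pvAllTriplets (PySem.Int.mod idx (pvAllTriplets.length : Int)) ("", "", ""))

def default_stock_profiles_py (n : Int) : List ((String × String × String) × String × String) :=
  let mu_triplets := default_mu_class_triplets_py ((3 : Int) ^ 3)
  let all_profiles :=
    pvGroupLabels.flatMap (fun alpha_group => pvGroupLabels.flatMap (fun epsilon_group =>
      mu_triplets.map (fun mu_triplet => (mu_triplet, alpha_group, epsilon_group))))
  let base_profile_count : Int := (all_profiles.length : Int)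
  let base_block_size := PySem.Int.floordiv n base_profile_count
  let remainder := PySem.Int.mod n base_profile_count
  (PySem.List.enumerate all_profiles).foldl
    (fun acc ip =>
      acc ++ PySem.List.pyRepeat [ip.2] (base_block_size + (if ip.1 < remainder then 1 else 0)))
    []

-- ===== PORT B =====
-- B's table: product(...) then the same comprehension (built directly, no 27-cycle detour).
def pvAltTable : List ((String × String × String) × String × String) :=
  (pvGroupLabels.flatMap (fun a => pvGroupLabels.flatMap (fun e =>
    (pvMuLabels.flatMap (fun x => pvMuLabels.flatMap (fun y =>
      pvMuLabels.map (fun z => (x, y, z))))).map (fun t => (t, a, e)))))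

-- all_profiles[p] never raises for j in range(n) (0 ≤ p < 243), so pyGetD is exact here.
def default_stock_profiles_py_alt (n : Int) :
    List ((String × String × String) × String × String) :=
  let count : Int := (pvAltTable.length : Int)
  let base := PySem.Int.floordiv n count
  let remainder := PySem.Int.mod n count
  let threshold := remainder * (base + 1)
  (PySem.List.pyRange 0 n 1).map (fun j =>
    let p := if j < threshold then PySem.Int.floordiv j (base + 1)
             else remainder + PySem.Int.floordiv (j - threshold) base
    PySem.List.pyGetD pvAltTable p (("", "", ""), "", ""))

-- ===== PRECONDITION & SPEC =====
def Spec_default_stock_profiles_py (n : Int) (out : List ((String × String × String) × String × String)) : Prop := out = default_stock_profiles_py_alt n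
instance (n : Int) (out : List ((String × String × String) × String × String)) : Decidable (Spec_default_stock_profiles_py n out) := by unfold Spec_default_stock_profiles_py; infer_instance

-- ===== CLAIM (what is proved, stated in full; the proofs are below) =====
def Claim_equal_default_stock_profiles_py : Prop := ∀ (n : Int), Dom_default_stock_profiles_py n → Spec_default_stock_profiles_py n (default_stock_profiles_py n)

-- ===== LEMMAS AND PROOFS =====

-- default element used for the (never-raising) pyGetD lookups
def pvD : ((String × String × String) × String × String) := (("", "", ""), "", "")

-- the j-th profile of the 243-entry table
def pvG (j : Int) : ((String × String × String) × String × String) :=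
  PySem.List.pyGetD pvAltTable j pvD

-- A's table (27-cycle detour) and B's directly-built table are the same 243-entry list
theorem pv_tableA_eq :
    (pvGroupLabels.flatMap (fun alpha_group => pvGroupLabels.flatMap (fun epsilon_group =>
      (default_mu_class_triplets_py ((3 : Int) ^ 3)).map
        (fun mu_triplet => (mu_triplet, alpha_group, epsilon_group))))) = pvAltTable := by
  set_option maxRecDepth 10000 in decide

theorem pv_len : PySem.List.len pvAltTable = 243 := by set_option maxRecDepth 4000 in decide

theorem pv_len' : ((pvAltTable.length : Nat) : Int) = 243 := by set_option maxRecDepth 4000 in decide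

-- positions 0..k*b-1 mapped through t ↦ t / b enumerate k uniform blocks of width b
theorem pv_div_blocks {α : Type} (g : Nat → α) (b : Nat) (k : Nat) :
    (List.range (k*b)).map (fun t => g (t / b)) =
      (List.range k).flatMap (fun i => List.replicate b (g i)) := by
  induction k with
  | zero => simp
  | succ k ih =>
    rcases Nat.eq_zero_or_pos b with hb | hb
    · subst hb; simp
    · rw [Nat.succ_mul, List.range_add, List.map_append, ih, List.range_succ,
        List.flatMap_append, List.map_map]
      congr 1
      have hc : ∀ t ∈ List.range b,
          ((fun t => g (t / b)) ∘ (fun x => k*b + x)) t = (fun _ => g k) t := by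
        intro t ht
        rw [List.mem_range] at ht
        simp only [Function.comp]
        congr 1
        rw [Nat.mul_comm k b, Nat.mul_add_div hb, Nat.div_eq_of_lt ht]
        omega
      rw [List.map_congr_left hc]
      simp

-- A in flatMap normal form
theorem pv_A_flat (n : Int) :
    default_stock_profiles_py n =
      (PySem.List.pyRange 0 243 1).flatMap (fun j =>
        List.replicate (PySem.Int.floordiv n 243 + if j < PySem.Int.mod n 243 then 1 else 0).toNat
          (pvG j)) := by
  simp only [default_stock_profiles_py]
  rw [pv_tableA_eq]
  rw [PySem.List.foldl_append_eq_flatMap, List.nil_append,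
      PySem.List.enumerate_eq_map_pyRange pvAltTable pvD, List.flatMap_map, pv_len, pv_len']
  simp only [PySem.List.pyRepeat_singleton, pvG]

-- B in map normal form
theorem pv_B_map (n : Int) :
    default_stock_profiles_py_alt n =
      (PySem.List.pyRange 0 n 1).map (fun j =>
        pvG (if j < PySem.Int.mod n 243 * (PySem.Int.floordiv n 243 + 1) then
               PySem.Int.floordiv j (PySem.Int.floordiv n 243 + 1)
             else PySem.Int.mod n 243 +
               PySem.Int.floordiv (j - PySem.Int.mod n 243 * (PySem.Int.floordiv n 243 + 1))
                 (PySem.Int.floordiv n 243))) := by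
  simp only [default_stock_profiles_py_alt, pv_len', pvG, pvD]

theorem pv_main (n : Int) : default_stock_profiles_py n = default_stock_profiles_py_alt n := by
  rw [pv_A_flat, pv_B_map]
  have hb : PySem.Int.floordiv n 243 = n / 243 := PySem.Int.floordiv_eq_ediv_of_pos (by norm_num)
  have hr : PySem.Int.mod n 243 = n % 243 := PySem.Int.mod_eq_emod_of_pos (by norm_num)
  rcases le_or_gt n 0 with hn | hn
  · rw [PySem.List.pyRange_one_eq_nil hn, List.map_nil, List.flatMap_eq_nil_iff]
    intro j hj
    rw [PySem.List.mem_pyRange_one] at hj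
    have h0 : (PySem.Int.floordiv n 243 + if j < PySem.Int.mod n 243 then 1 else 0).toNat = 0 := by
      rw [hb, hr]; split_ifs with h <;> omega
    rw [h0, List.replicate_zero]
  · -- positive n: split both sides at the remainder boundary and use pv_div_blocks
    obtain ⟨B0, hB0⟩ : ∃ m : Nat, PySem.Int.floordiv n 243 = (m : Int) := ⟨(n / 243).toNat, by omega⟩
    obtain ⟨R, hR⟩ : ∃ m : Nat, PySem.Int.mod n 243 = (m : Int) := ⟨(n % 243).toNat, by omega⟩
    have hnN : n.toNat = R * (B0 + 1) + (243 - R) * B0 := by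
      have h1 : R * B0 ≤ 243 * B0 := Nat.mul_le_mul_right _ (by omega)
      have h2 : n.toNat = 243 * B0 + R := by omega
      rw [h2, Nat.sub_mul]
      zify [h1]
      ring
    have hT : PySem.Int.mod n 243 * (PySem.Int.floordiv n 243 + 1) = ((R * (B0 + 1) : Nat) : Int) := by
      rw [hB0, hR]; push_cast; ring
    -- B side: split range n at the threshold
    rw [PySem.List.pyRange_one 0 n, List.map_map]
    rw [show ((n : Int) - 0).toNat = R * (B0 + 1) + (243 - R) * B0 from by rw [Int.sub_zero]; exact hnN]
    rw [List.range_add, List.map_append, List.map_map]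
    -- A side: split range 243 at the remainder
    rw [PySem.List.pyRange_one_append 0 (PySem.Int.mod n 243) 243 (by omega) (by omega),
        List.flatMap_append,
        PySem.List.pyRange_one 0 (PySem.Int.mod n 243),
        PySem.List.pyRange_one (PySem.Int.mod n 243) 243,
        List.flatMap_map, List.flatMap_map,
        show (PySem.Int.mod n 243 - 0).toNat = R from by omega,
        show ((243 : Int) - PySem.Int.mod n 243).toNat = 243 - R from by omega]
    congr 1
    · -- first block: positions below the threshold / profiles below the remainder
      have eB : ∀ t ∈ List.range (R * (B0 + 1)),
          ((fun j => pvG (if j < PySem.Int.mod n 243 * (PySem.Int.floordiv n 243 + 1) then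
                 PySem.Int.floordiv j (PySem.Int.floordiv n 243 + 1)
               else PySem.Int.mod n 243 +
                 PySem.Int.floordiv (j - PySem.Int.mod n 243 * (PySem.Int.floordiv n 243 + 1))
                   (PySem.Int.floordiv n 243))) ∘ (fun k : Nat => (0 : Int) + (k : Int))) t
            = (fun t => (fun i : Nat => pvG (i : Int)) (t / (B0 + 1))) t := by
        intro t ht
        rw [List.mem_range] at ht
        simp only [Function.comp, zero_add]
        rw [hT, if_pos (by exact_mod_cast ht), hB0,
            show ((B0 : Int) + 1) = ((B0 + 1 : Nat) : Int) from by push_cast; ring,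
            PySem.Int.floordiv_natCast]
      have eA : ∀ i ∈ List.range R,
          (fun i : Nat => List.replicate
              (PySem.Int.floordiv n 243 + if (0 : Int) + (i : Int) < PySem.Int.mod n 243 then 1 else 0).toNat
              (pvG ((0 : Int) + (i : Int)))) i
            = (fun i : Nat => List.replicate (B0 + 1) (pvG (i : Int))) i := by
        intro i hi
        rw [List.mem_range] at hi
        simp only [zero_add]
        rw [if_pos (by omega), hB0]
        congr 1
      rw [List.flatMap_def, List.map_congr_left eA, ← List.flatMap_def,
          List.map_congr_left eB, pv_div_blocks (fun i : Nat => pvG (i : Int)) (B0 + 1) R]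
    · -- second block: positions above the threshold / profiles from the remainder up
      have eB : ∀ t ∈ List.range ((243 - R) * B0),
          (((fun j => pvG (if j < PySem.Int.mod n 243 * (PySem.Int.floordiv n 243 + 1) then
                 PySem.Int.floordiv j (PySem.Int.floordiv n 243 + 1)
               else PySem.Int.mod n 243 +
                 PySem.Int.floordiv (j - PySem.Int.mod n 243 * (PySem.Int.floordiv n 243 + 1))
                   (PySem.Int.floordiv n 243))) ∘ (fun k : Nat => (0 : Int) + (k : Int)))
              ∘ (fun x : Nat => R * (B0 + 1) + x)) t
            = (fun t => (fun i : Nat => pvG ((R : Int) + (i : Int))) (t / B0)) t := by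
        intro t ht
        rw [List.mem_range] at ht
        simp only [Function.comp, zero_add]
        rw [hT, if_neg (by exact_mod_cast Nat.not_lt.mpr (Nat.le_add_right (R * (B0 + 1)) t)),
            hR, hB0,
            show ((((R * (B0 + 1) + t : Nat) : Int)) - ((R * (B0 + 1) : Nat) : Int)) = ((t : Nat) : Int) from by push_cast; ring,
            PySem.Int.floordiv_natCast]
      have eA : ∀ i ∈ List.range (243 - R),
          (fun i : Nat => List.replicate
              (PySem.Int.floordiv n 243 + if PySem.Int.mod n 243 + (i : Int) < PySem.Int.mod n 243 then 1 else 0).toNat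
              (pvG (PySem.Int.mod n 243 + (i : Int)))) i
            = (fun i : Nat => List.replicate B0 (pvG ((R : Int) + (i : Int)))) i := by
        intro i hi
        rw [List.mem_range] at hi
        simp only [hR, hB0]
        rw [if_neg (by omega)]
        congr 1
      rw [List.flatMap_def, List.map_congr_left eA, ← List.flatMap_def,
          List.map_congr_left eB, pv_div_blocks (fun i : Nat => pvG ((R : Int) + (i : Int))) B0 (243 - R)]

-- ===== VERDICT (by name: the statement is the Claim_ definition above) =====
theorem default_stock_profiles_py_spec : Claim_equal_default_stock_profiles_py := by
  intro n _
  exact pv_main n
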